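-- pv_equiv track=rewrite | github.com/Agilham/Tubes-TBFO-Parser | src/test.py | getCombinationOfNullable
-- ===== SOURCE A (Python) =====
-- def getCombinationOfNullable(RHS, nullable):
--     newProduct = set()
--     if (len(RHS) != 0):
--         combTail = getCombinationOfNullable(RHS[1:],nullable)
--         if RHS[0] in nullable:
--             newProduct = newProduct.union(combTail)
--         for comb in combTail:
--             newProduct.add((RHS[0],)+comb)
--     else:
--         newProduct.add(tuple())
--     return newProduct
-- ===== SOURCE B (Python) =====
-- def getCombinationOfNullable(RHS, nullable):
--     combos = [()]
--     for sym in RHS: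
--         if sym in nullable:
--             combos = [c + t for c in combos for t in ((), (sym,))]
--         else:
--             combos = [c + (sym,) for c in combos]
--     return set(combos)
-- ===== Notes on version B (the rewrite author's own statement) =====
-- stated objective: simpler
-- what changed: Replaced the suffix recursion that unions/extends a set at every level with a single left-to-right fold that builds the plain list of all keep/drop combinations (drop-before-keep per nullable symbol) and deduplicates once with set() at the end.
import Mathlib
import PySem

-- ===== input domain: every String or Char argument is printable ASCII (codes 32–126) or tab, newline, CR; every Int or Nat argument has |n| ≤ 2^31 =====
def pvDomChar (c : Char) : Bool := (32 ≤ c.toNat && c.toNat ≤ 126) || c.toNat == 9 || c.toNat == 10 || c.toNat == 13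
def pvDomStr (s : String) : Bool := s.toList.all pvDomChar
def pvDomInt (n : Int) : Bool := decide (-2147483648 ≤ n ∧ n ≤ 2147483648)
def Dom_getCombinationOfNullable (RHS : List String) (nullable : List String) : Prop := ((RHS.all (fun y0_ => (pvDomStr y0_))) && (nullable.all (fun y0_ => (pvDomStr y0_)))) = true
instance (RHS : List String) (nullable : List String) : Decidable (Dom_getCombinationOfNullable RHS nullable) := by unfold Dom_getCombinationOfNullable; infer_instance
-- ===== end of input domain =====

-- B replaces A's suffix recursion (set union + per-level dedup) by a single left fold building the
-- plain list of keep/drop combinations, deduplicated once at the end (objective: simpler).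


-- ===== PORT A =====
-- 'if len(RHS) != 0: … RHS[0] … RHS[1:] … else: …' is rendered as the structural match
-- (head/tail = RHS[0]/RHS[1:]); the set is PySem.Set (first-insertion order, exact as a set).
def getCombinationOfNullable (RHS : List String) (nullable : List String) : List (List String) :=
  match RHS with
  | h :: t =>
      let combTail := getCombinationOfNullable t nullable
      let newProduct : PySem.Set (List String) :=
        if h ∈ nullable then PySem.Set.union PySem.Set.empty combTail else PySem.Set.empty
      combTail.foldl (fun s comb => PySem.Set.add s (h :: comb)) newProduct
  | [] => PySem.Set.add PySem.Set.empty ([] : List String)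

-- ===== PORT B =====
-- 'c + ()' is 'c', 'c + (sym,)' is 'c ++ [sym]'; the two comprehensions are flatMap/map over combos,
-- and the final 'set(combos)' is PySem.Set.ofList.
def getCombinationOfNullable_alt (RHS : List String) (nullable : List String) : List (List String) :=
  let combos := RHS.foldl (fun combos sym =>
      if sym ∈ nullable then combos.flatMap (fun c => [c, c ++ [sym]])
      else combos.map (fun c => c ++ [sym])) [([] : List String)]
  PySem.Set.ofList combos

-- ===== PRECONDITION & SPEC =====
def Spec_getCombinationOfNullable (RHS : List String) (nullable : List String) (out : List (List String)) : Prop := out = getCombinationOfNullable_alt RHS nullable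
instance (RHS : List String) (nullable : List String) (out : List (List String)) : Decidable (Spec_getCombinationOfNullable RHS nullable out) := by unfold Spec_getCombinationOfNullable; infer_instance

-- ===== CLAIM (what is proved, stated in full; the proofs are below) =====
def Claim_equal_getCombinationOfNullable : Prop := ∀ (RHS : List String) (nullable : List String), Dom_getCombinationOfNullable RHS nullable → Spec_getCombinationOfNullable RHS nullable (getCombinationOfNullable RHS nullable)

-- ===== LEMMAS AND PROOFS =====

-- the per-symbol choices of B's fold, as a list: drop (only if nullable) before keep
def pvChoices (nullable : List String) (s : String) : List (List String) :=
  if s ∈ nullable then [[], [s]] else [[s]]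

-- the full combination list in B's generation order, by recursion on the RHS
def pvProd (nullable : List String) : List String → List (List String)
  | [] => [[]]
  | h :: t => (pvChoices nullable h).flatMap (fun ch => (pvProd nullable t).map (fun p => ch ++ p))

lemma pvStep_eq (nullable : List String) (sym : String) (acc : List (List String)) :
    (if sym ∈ nullable then acc.flatMap (fun c => [c, c ++ [sym]])
     else acc.map (fun c => c ++ [sym]))
    = acc.flatMap (fun c => (pvChoices nullable sym).map (fun ch => c ++ ch)) := by
  unfold pvChoices
  split_ifs <;> [skip; induction acc] <;> simp_all

lemma pvFoldl_eq (nullable : List String) : ∀ (l : List String) (acc : List (List String)),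
    l.foldl (fun combos sym =>
      if sym ∈ nullable then combos.flatMap (fun c => [c, c ++ [sym]])
      else combos.map (fun c => c ++ [sym])) acc
    = acc.flatMap (fun c => (pvProd nullable l).map (fun p => c ++ p)) := by
  intro l
  induction l with
  | nil => intro acc; simp [pvProd]
  | cons h t ih =>
      intro acc
      simp only [List.foldl_cons]
      rw [ih, pvStep_eq]
      simp only [pvProd]
      simp [List.flatMap_assoc, List.flatMap_map, List.map_flatMap, List.map_map, Function.comp_def,
        List.append_assoc]

-- B's value is the deduplication of pvProd
lemma alt_eq_ofList_pvProd (RHS nullable : List String) :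
    getCombinationOfNullable_alt RHS nullable = PySem.Set.ofList (pvProd nullable RHS) := by
  unfold getCombinationOfNullable_alt
  rw [pvFoldl_eq]
  simp

lemma discard_map_inj {α β : Type} [BEq α] [LawfulBEq α] [BEq β] [LawfulBEq β]
    {f : α → β} (hf : Function.Injective f) (s : List α) (x : α) :
    PySem.Set.discard (s.map f) (f x) = (PySem.Set.discard s x).map f := by
  simp only [PySem.Set.discard, List.filter_map]
  congr 1
  apply List.filter_congr
  intro y _
  simp [hf.eq_iff]

lemma ofList_map_inj {α β : Type} [BEq α] [LawfulBEq α] [BEq β] [LawfulBEq β]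
    {f : α → β} (hf : Function.Injective f) : ∀ (l : List α),
    PySem.Set.ofList (l.map f) = (PySem.Set.ofList l).map f := by
  intro l
  induction l with
  | nil => simp [PySem.Set.ofList]
  | cons h t ih =>
      simp only [List.map_cons, PySem.Set.ofList_cons, ih, discard_map_inj hf]

-- folding Set.add over a list and over its deduplication coincide
lemma update_ofList {α : Type} [BEq α] [LawfulBEq α] (s : PySem.Set α) (l : List α) :
    PySem.Set.update s (PySem.Set.ofList l) = PySem.Set.update s l := by
  rw [PySem.Set.update_eq_append_filter, PySem.Set.update_eq_append_filter,
    PySem.Set.ofList_ofList]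

lemma a_eq_ofList_pvProd (nullable : List String) : ∀ (RHS : List String),
    getCombinationOfNullable RHS nullable = PySem.Set.ofList (pvProd nullable RHS) := by
  intro RHS
  induction RHS with
  | nil => rfl
  | cons h t ih =>
      have hcons : Function.Injective (fun c : List String => h :: c) := List.cons_injective
      unfold getCombinationOfNullable
      simp only [ih]
      by_cases hn : h ∈ nullable
      · simp only [if_pos hn, pvProd, pvChoices, List.flatMap_cons, List.flatMap_nil,
          List.map_id_fun', List.nil_append, List.append_nil]
        have hunion : PySem.Set.union PySem.Set.empty (PySem.Set.ofList (pvProd nullable t))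
            = PySem.Set.ofList (pvProd nullable t) := by
          show PySem.Set.update ([] : PySem.Set (List String)) _ = _
          rw [PySem.Set.update_nil_left, PySem.Set.ofList_ofList]
        rw [hunion]
        have hmap : ∀ p : List String, [h] ++ p = h :: p := fun _ => rfl
        calc List.foldl (fun s comb => PySem.Set.add s (h :: comb))
              (PySem.Set.ofList (pvProd nullable t)) (PySem.Set.ofList (pvProd nullable t))
            = PySem.Set.update (PySem.Set.ofList (pvProd nullable t))
                ((PySem.Set.ofList (pvProd nullable t)).map (fun c => h :: c)) := by
              rw [PySem.Set.update_map_eq_foldl_add]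
          _ = PySem.Set.update (PySem.Set.ofList (pvProd nullable t))
                (PySem.Set.ofList ((pvProd nullable t).map (fun c => h :: c))) := by
              rw [ofList_map_inj hcons]
          _ = PySem.Set.update (PySem.Set.ofList (pvProd nullable t))
                ((pvProd nullable t).map (fun c => h :: c)) := update_ofList _ _
          _ = PySem.Set.ofList (pvProd nullable t ++ (pvProd nullable t).map (fun p => [h] ++ p)) := by
              rw [PySem.Set.ofList_append]; simp only [hmap]
      · simp only [if_neg hn, pvProd, pvChoices, List.flatMap_cons, List.flatMap_nil,
          List.append_nil]
        have hmap : ∀ p : List String, [h] ++ p = h :: p := fun _ => rfl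
        calc List.foldl (fun s comb => PySem.Set.add s (h :: comb)) PySem.Set.empty
              (PySem.Set.ofList (pvProd nullable t))
            = PySem.Set.update ([] : PySem.Set (List String))
                ((PySem.Set.ofList (pvProd nullable t)).map (fun c => h :: c)) := by
              rw [PySem.Set.update_map_eq_foldl_add]; rfl
          _ = PySem.Set.ofList ((PySem.Set.ofList (pvProd nullable t)).map (fun c => h :: c)) :=
              PySem.Set.update_nil_left _
          _ = PySem.Set.ofList (PySem.Set.ofList ((pvProd nullable t).map (fun c => h :: c))) := by
              rw [← ofList_map_inj hcons]
          _ = PySem.Set.ofList ((pvProd nullable t).map (fun c => h :: c)) :=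
              PySem.Set.ofList_ofList _
          _ = PySem.Set.ofList ((pvProd nullable t).map (fun p => [h] ++ p)) := by
              simp only [hmap]

-- ===== VERDICT (by name: the statement is the Claim_ definition above) =====
theorem getCombinationOfNullable_spec : Claim_equal_getCombinationOfNullable := by
  intro RHS nullable _
  unfold Spec_getCombinationOfNullable
  rw [a_eq_ofList_pvProd, alt_eq_ofList_pvProd]
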